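-- pv_equiv track=rewrite | github.com/MaybebabyEnjoyer/ITMO | course1/sem1/discrete-math/Lab-3/23.py | get_prev_binary_string
-- ===== SOURCE A (Python) =====
-- def get_prev_binary_string(n: int, s: str) -> str:
--     s = list(s)
--     for i in range(n - 1, -1, -1):
--         if s[i] == "1":
--             s[i] = "0"
--             break
--         else:
--             s[i] = "1"
--     return "".join(s)
-- ===== SOURCE B (Python) =====
-- def get_prev_binary_string(n: int, s: str) -> str:
--     # Arithmetic re-implementation: interpret the n-bit prefix as an integer,
--     # decrement modulo 2**n, and reformat zero-padded; the tail s[n:] is kept.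
--     if n <= 0:
--         return s
--     v = int(s[:n], 2)
--     return format((v - 1) % (1 << n), "0%db" % n) + s[n:]
-- ===== Notes on version B (the rewrite author's own statement) =====
-- stated objective: idiomatic
-- what changed: Replaces A's right-to-left borrow/flip character scan by a single arithmetic decrement: parse the n-bit prefix with int(s[:n],2), compute (v-1) % 2**n, and reformat zero-padded; the all-zeros wraparound to all-ones falls out of the modulo.
-- outside the precondition, e.g. on get_prev_binary_string(3, '1'): A raises IndexError, B returns '000'; on get_prev_binary_string(2, 'a0'): A returns '11', B raises ValueError
import Mathlib
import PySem

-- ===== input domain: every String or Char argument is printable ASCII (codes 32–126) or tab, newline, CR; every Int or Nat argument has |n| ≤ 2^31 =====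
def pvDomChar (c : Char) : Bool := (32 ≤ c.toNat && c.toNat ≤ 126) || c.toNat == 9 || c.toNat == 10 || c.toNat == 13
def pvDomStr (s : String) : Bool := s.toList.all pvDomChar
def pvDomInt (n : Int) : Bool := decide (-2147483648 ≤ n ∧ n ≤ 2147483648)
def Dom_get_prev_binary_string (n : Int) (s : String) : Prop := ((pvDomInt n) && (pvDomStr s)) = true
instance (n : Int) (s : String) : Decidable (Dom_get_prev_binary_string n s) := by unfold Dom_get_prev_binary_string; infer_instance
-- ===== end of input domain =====

-- B replaces A's right-to-left borrow/flip character scan by an arithmetic decrement: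
-- parse the n-bit prefix as an integer, take (v-1) mod 2^n, reformat zero-padded (objective: idiomatic).

-- ===== PORT A =====
-- the for-loop over range(n-1, -1, -1) with break, state = the char list
def pvALoop : List Int → List Char → List Char
  | [], cs => cs
  | i :: rest, cs =>
    if PySem.List.pyGetD cs i ' ' = '1' then PySem.List.pySetD cs i '0'
    else pvALoop rest (PySem.List.pySetD cs i '1')

def get_prev_binary_string (n : Int) (s : String) : String :=
  String.ofList (pvALoop (PySem.List.pyRange (n - 1) (-1) (-1)) s.toList)

-- ===== PORT B =====
-- int(p, 2): hand port of the base-2 parse, exact on '0'/'1' strings (all Pre_ admits)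
def pvBits (l : List Char) : Int :=
  l.foldl (fun a c => 2 * a + (if c = '1' then 1 else 0)) 0

-- binary digits of w (empty for 0); format(r,'0nb') = zero-pad of this (with "0" for r = 0)
def pvToBin : Nat → List Char
  | 0 => []
  | (w + 1) => pvToBin ((w + 1) / 2) ++ [if (w + 1) % 2 = 1 then '1' else '0']
decreasing_by exact Nat.div_lt_self (Nat.succ_pos w) (by omega)

-- int(x, 2): Python also allows surrounding whitespace, one sign, a 0b/0B prefix and
-- digit-group underscores; where it RAISES instead (any other character) the port's value
-- is never compared, so the parse below is exact wherever int(x, 2) returns (ASCII input)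
def pvDrop0b : List Char → List Char
  | '0' :: 'b' :: r => r
  | '0' :: 'B' :: r => r
  | r => r

def pvParse2 (l : List Char) : Int :=
  match l.filter (fun c => !(c == ' ' || c == '\t' || c == '\n' || c == '\r' || c == '_')) with
  | '-' :: r => - pvBits (pvDrop0b ('-' :: r).tail)
  | '+' :: r => pvBits (pvDrop0b ('+' :: r).tail)
  | r => pvBits (pvDrop0b r)

-- format(r, '0mb') for 0 ≤ r: zero-pad the binary digits of r to width m
def pvFmt (m : Nat) (r : Int) : List Char :=
  let bits : List Char := if r = 0 then ['0'] else pvToBin r.toNat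
  List.replicate (m - bits.length) '0' ++ bits

def get_prev_binary_string_alt (n : Int) (s : String) : String :=
  if n ≤ 0 then s
  else
    String.ofList (pvFmt n.toNat                                              -- format(..., '0nb')
        (PySem.Int.mod (pvParse2 (PySem.List.slice s.toList none (some n)) - 1) -- (int(s[:n],2) - 1)
          ((2 : Int) ^ n.toNat))                                              --   % (1 << n)
      ++ PySem.List.slice s.toList (some n) none)                             -- + s[n:]

-- ===== PRECONDITION & SPEC =====
-- Pre_ excludes the inputs where A raises IndexError (n > len(s)) and, restricting to the
-- task's natural domain of binary strings, prefixes with non-'0'/'1' characters, where A's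
-- flip-everything-to-'1' output is an artefact of its scan and B raises ValueError.
def Pre_get_prev_binary_string (n : Int) (s : String) : Prop :=
  n ≤ (s.toList.length : Int) ∧ (s.toList.take n.toNat).all (fun c => c == '0' || c == '1') = true
instance (n : Int) (s : String) : Decidable (Pre_get_prev_binary_string n s) := by
  unfold Pre_get_prev_binary_string; infer_instance

def pvWitness_get_prev_binary_string : Int × String := (2, "10")

def Spec_get_prev_binary_string (n : Int) (s : String) (out : String) : Prop := out = get_prev_binary_string_alt n s
instance (n : Int) (s : String) (out : String) : Decidable (Spec_get_prev_binary_string n s out) := by unfold Spec_get_prev_binary_string; infer_instance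

-- ===== CLAIM (what is proved, stated in full; the proofs are below) =====
def Claim_equal_get_prev_binary_string : Prop := ∀ (n : Int) (s : String), Dom_get_prev_binary_string n s → Pre_get_prev_binary_string n s → Spec_get_prev_binary_string n s (get_prev_binary_string n s)

-- ===== LEMMAS AND PROOFS =====

-- proof-side form of the binary-prefix condition of Pre_
def pvBin (l : List Char) : Prop := ∀ c ∈ l, c = '0' ∨ c = '1'

lemma pvBin_of_all (l : List Char) (h : l.all (fun c => c == '0' || c == '1') = true) :
    pvBin l := by
  intro c hc
  have := List.all_eq_true.mp h c hc
  simpa using this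

-- on a plain binary string the lenient parse is just the digit fold
lemma pvParse2_eq (l : List Char) (hb : pvBin l) : pvParse2 l = pvBits l := by
  have hf : l.filter (fun c => !(c == ' ' || c == '\t' || c == '\n' || c == '\r' || c == '_')) = l := by
    apply List.filter_eq_self.mpr
    intro c hc
    rcases hb c hc with h | h <;> subst h <;> decide
  unfold pvParse2
  rw [hf]
  rcases l with _ | ⟨c, r⟩
  · rfl
  · rcases hb c (by simp) with h | h <;> subst h
    · rcases r with _ | ⟨d, r'⟩
      · rfl
      · rcases hb d (by simp) with h2 | h2 <;> subst h2 <;> rfl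
    · rfl

-- index (as Int) of the last '1' among the first m characters of cs, else -1
def pvAux (cs : List Char) : Nat → Int
  | 0 => -1
  | m + 1 => if cs[m]? = some '1' then (m : Int) else pvAux cs m

lemma pvAux_range (cs : List Char) (m : Nat) :
    pvAux cs m = -1 ∨ (0 ≤ pvAux cs m ∧ pvAux cs m < (m : Int)) := by
  induction m with
  | zero => left; rfl
  | succ j ih =>
    rw [pvAux]
    by_cases h : cs[j]? = some '1'
    · right; rw [if_pos h]; constructor <;> omega
    · rw [if_neg h]
      rcases ih with h1 | h1
      · left; exact h1
      · right; exact ⟨h1.1, by omega⟩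

lemma pvAux_set_ge (cs : List Char) (k : Nat) (v : Char) :
    ∀ m ≤ k, pvAux (cs.set k v) m = pvAux cs m := by
  intro m
  induction m with
  | zero => intro _; rfl
  | succ j ih =>
    intro h
    rw [pvAux, pvAux, List.getElem?_set_ne (by omega), ih (by omega)]

-- A's loop computes: flip the last '1' of the first m chars to '0', everything after it to '1'
lemma pvALoop_eq (m : Nat) : ∀ (cs : List Char), m ≤ cs.length →
    pvALoop (PySem.List.pyRange ((m : Int) - 1) (-1) (-1)) cs =
      (if pvAux cs m = -1 then List.replicate m '1' ++ cs.drop m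
       else cs.take (pvAux cs m).toNat ++ '0' ::
         List.replicate (m - (pvAux cs m).toNat - 1) '1' ++ cs.drop m) := by
  induction m with
  | zero =>
    intro cs _
    rw [PySem.List.pyRange_neg_one_eq_nil (by omega)]
    simp [pvALoop, pvAux]
  | succ m ih =>
    intro cs h
    have hm : m < cs.length := by omega
    have hcast : ((m + 1 : Nat) : Int) - 1 = (m : Int) := by omega
    rw [hcast, PySem.List.pyRange_neg_one_cons (by omega)]
    show (if PySem.List.pyGetD cs (m : Int) ' ' = '1' then PySem.List.pySetD cs (m : Int) '0'
      else pvALoop (PySem.List.pyRange ((m : Int) - 1) (-1) (-1)) (PySem.List.pySetD cs (m : Int) '1')) = _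
    rw [PySem.List.pyGetD_eq_getElem cs ' ' (by omega) (by omega)]
    simp only [Int.toNat_natCast, PySem.List.pySetD_natCast]
    by_cases h1 : cs[m] = '1'
    · rw [if_pos h1]
      have haux : pvAux cs (m + 1) = (m : Int) := by
        rw [pvAux, if_pos (by rw [List.getElem?_eq_getElem hm, h1])]
      rw [haux, if_neg (by omega)]
      rw [List.set_eq_take_append_cons_drop, if_pos hm]
      simp
    · rw [if_neg h1]
      rw [ih (cs.set m '1') (by simp; omega)]
      have haux : pvAux cs (m + 1) = pvAux cs m := by
        rw [pvAux, if_neg (by rw [List.getElem?_eq_getElem hm]; simp [h1])]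
      have hauxset : pvAux (cs.set m '1') m = pvAux cs m := pvAux_set_ge cs m '1' m le_rfl
      have hdropset : (cs.set m '1').drop m = '1' :: cs.drop (m + 1) := by
        rw [List.drop_set, if_neg (by omega)]
        rw [show m - m = 0 from Nat.sub_self m]
        rw [List.drop_eq_getElem_cons hm, List.set_cons_zero]
      rcases pvAux_range cs m with hr | hr
      · rw [haux, hr, hauxset, hr, if_pos rfl, if_pos rfl, hdropset]
        rw [List.replicate_succ']
        simp
      · rw [haux, hauxset, if_neg (by omega), if_neg (by omega), hdropset]
        have hj : (pvAux cs m).toNat < m := by omega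
        have htake : (cs.set m '1').take (pvAux cs m).toNat = cs.take (pvAux cs m).toNat := by
          rw [List.take_set, List.set_eq_of_length_le]
          simp; omega
        rw [htake]
        have hrep : m - (pvAux cs m).toNat - 1 + 1 = m + 1 - (pvAux cs m).toNat - 1 := by omega
        rw [← hrep, List.replicate_succ']
        simp

-- pvAux = -1 means: no '1' among the first m chars
lemma pvAux_spec_neg (cs : List Char) (m : Nat) (h : pvAux cs m = -1) :
    ∀ i < m, cs[i]? ≠ some '1' := by
  induction m with
  | zero => intro i hi; omega
  | succ j ih =>
    rw [pvAux] at h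
    by_cases h1 : cs[j]? = some '1'
    · rw [if_pos h1] at h; omega
    · rw [if_neg h1] at h
      intro i hi
      by_cases hij : i = j
      · rw [hij]; exact h1
      · exact ih h i (by omega)

-- pvAux ≥ 0 means: a '1' there, and no '1' strictly after it before m
lemma pvAux_spec_pos (cs : List Char) (m : Nat) (h : 0 ≤ pvAux cs m) :
    cs[(pvAux cs m).toNat]? = some '1' ∧
      ∀ i : Nat, pvAux cs m < (i : Int) → i < m → cs[i]? ≠ some '1' := by
  induction m with
  | zero => simp [pvAux] at h
  | succ j ih =>
    rw [pvAux]
    by_cases h1 : cs[j]? = some '1'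
    · rw [if_pos h1]
      refine ⟨by simpa using h1, ?_⟩
      intro i hlt hi
      omega
    · rw [pvAux, if_neg h1] at h
      rw [if_neg h1]
      obtain ⟨ha, hb⟩ := ih h
      refine ⟨ha, ?_⟩
      intro i hlt hi
      by_cases hij : i = j
      · rw [hij]; exact h1
      · exact hb i hlt (by omega)

-- ----- arithmetic of pvBits / pvToBin -----

lemma pvBits_foldl (l : List Char) : ∀ a : Int,
    l.foldl (fun a c => 2 * a + (if c = '1' then 1 else 0)) a = a * 2 ^ l.length + pvBits l := by
  induction l with
  | nil => intro a; simp [pvBits]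
  | cons c t ih =>
    intro a
    show t.foldl _ (2 * a + _) = _
    rw [ih]
    have : pvBits (c :: t) = t.foldl (fun a c => 2 * a + (if c = '1' then 1 else 0))
        (2 * 0 + (if c = '1' then 1 else 0)) := rfl
    rw [this, ih]
    simp [List.length_cons, pow_succ]
    split_ifs <;> ring

lemma pvBits_append (x y : List Char) :
    pvBits (x ++ y) = pvBits x * 2 ^ y.length + pvBits y := by
  rw [show pvBits (x ++ y)
      = List.foldl (fun a c => 2 * a + (if c = '1' then 1 else 0)) (pvBits x) y from by
    simp [pvBits, List.foldl_append]]
  exact pvBits_foldl y (pvBits x)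

lemma pvBits_cons (c : Char) (t : List Char) :
    pvBits (c :: t) = (if c = '1' then 1 else 0) * 2 ^ t.length + pvBits t := by
  have h1 : pvBits [c] = (if c = '1' then 1 else 0) := by simp [pvBits]
  rw [show c :: t = [c] ++ t from rfl, pvBits_append, h1]

lemma pvBits_rep0 (k : Nat) : pvBits (List.replicate k '0') = 0 := by
  induction k with
  | zero => rfl
  | succ j ih => rw [List.replicate_succ, pvBits_cons, ih]; simp

lemma pvBits_rep1 (k : Nat) : pvBits (List.replicate k '1') = 2 ^ k - 1 := by
  induction k with
  | zero => rfl
  | succ j ih =>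
    rw [List.replicate_succ, pvBits_cons, ih]
    simp [pow_succ]
    ring

lemma pvBits_nonneg (l : List Char) : 0 ≤ pvBits l := by
  induction l with
  | nil => simp [pvBits]
  | cons c t ih =>
    rw [pvBits_cons]
    have : (0 : Int) ≤ 2 ^ t.length := by positivity
    split_ifs <;> nlinarith

lemma pvBits_lt (l : List Char) : pvBits l < 2 ^ l.length := by
  induction l with
  | nil => simp [pvBits]
  | cons c t ih =>
    rw [pvBits_cons, List.length_cons, pow_succ]
    have h0 : (0 : Int) ≤ 2 ^ t.length := by positivity
    split_ifs <;> nlinarith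

lemma pvToBin_bits (w : Nat) : pvBits (pvToBin w) = (w : Int) := by
  induction w using Nat.strong_induction_on with
  | _ w ih =>
    match w with
    | 0 => simp [pvToBin, pvBits]
    | w + 1 =>
      rw [pvToBin, pvBits_append, ih ((w + 1) / 2) (Nat.div_lt_self (Nat.succ_pos w) (by omega))]
      have hq : 2 * ((w + 1) / 2) + (w + 1) % 2 = w + 1 := by omega
      by_cases h2 : (w + 1) % 2 = 1
      · rw [if_pos h2]
        have : pvBits ['1'] = 1 := by simp [pvBits]
        rw [this]
        simp only [List.length_singleton, pow_one]
        push_cast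
        omega
      · rw [if_neg h2]
        have : pvBits ['0'] = 0 := by simp [pvBits]
        rw [this]
        simp only [List.length_singleton, pow_one]
        push_cast
        omega

lemma pvToBin_len (k : Nat) : ∀ w : Nat, w < 2 ^ k → (pvToBin w).length ≤ k := by
  induction k with
  | zero =>
    intro w hw
    interval_cases w
    simp [pvToBin]
  | succ j ih =>
    intro w hw
    match w with
    | 0 => simp [pvToBin]
    | w + 1 =>
      rw [pvToBin, List.length_append, List.length_singleton]
      have : (w + 1) / 2 < 2 ^ j := by
        rw [Nat.div_lt_iff_lt_mul (by omega)]
        calc w + 1 < 2 ^ (j + 1) := hw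
        _ = 2 ^ j * 2 := by ring
      have := ih _ this
      omega

lemma pvToBin_binary (w : Nat) : pvBin (pvToBin w) := by
  induction w using Nat.strong_induction_on with
  | _ w ih =>
    match w with
    | 0 => intro c hc; simp [pvToBin] at hc
    | w + 1 =>
      intro c hc
      rw [pvToBin] at hc
      rcases List.mem_append.mp hc with h | h
      · exact ih ((w + 1) / 2) (Nat.div_lt_self (Nat.succ_pos w) (by omega)) c h
      · simp at h
        split_ifs at h <;> simp [h]

lemma pvBits_inj : ∀ (x y : List Char), pvBin x → pvBin y → x.length = y.length →
    pvBits x = pvBits y → x = y := by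
  intro x
  induction x with
  | nil =>
    intro y _ _ hlen _
    cases y with
    | nil => rfl
    | cons d u => simp at hlen
  | cons c t ih =>
    intro y hbx hby hlen hbits
    cases y with
    | nil => simp at hlen
    | cons d u =>
      have hlen' : t.length = u.length := by simpa using hlen
      rw [pvBits_cons, pvBits_cons, hlen'] at hbits
      have ht0 := pvBits_nonneg t
      have ht1 := pvBits_lt t
      have hu0 := pvBits_nonneg u
      have hu1 := pvBits_lt u
      rw [hlen'] at ht1
      have hdig : (if c = '1' then (1 : Int) else 0) = (if d = '1' then 1 else 0) := by
        split_ifs at hbits ⊢ <;> omega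
      have hcd : c = d := by
        rcases hbx c (by simp) with h | h <;> rcases hby d (by simp) with h' | h' <;>
          simp [h, h'] at hdig ⊢
      have htu : t = u := by
        apply ih u (fun a ha => hbx a (by simp [ha])) (fun a ha => hby a (by simp [ha])) hlen'
        rw [hdig] at hbits
        omega
      rw [hcd, htu]

-- zero-padded binary formatting inverts pvBits on binary strings
lemma pvFormat_eq (p : List Char) (hb : pvBin p) (hm : 1 ≤ p.length) :
    pvFmt p.length (pvBits p) = p := by
  simp only [pvFmt]
  set bits : List Char := if pvBits p = 0 then ['0'] else pvToBin (pvBits p).toNat with hbits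
  have hbbin : pvBin bits := by
    rw [hbits]; split_ifs
    · intro c hc; simp at hc; simp [hc]
    · exact pvToBin_binary _
  have hblen : bits.length ≤ p.length := by
    rw [hbits]; split_ifs
    · simpa using hm
    · apply pvToBin_len
      have h1 := pvBits_lt p
      have h0 := pvBits_nonneg p
      have : ((pvBits p).toNat : Int) < ((2 ^ p.length : Nat) : Int) := by push_cast; omega
      exact_mod_cast this
  have hbv : pvBits bits = pvBits p := by
    rw [hbits]; split_ifs with h
    · rw [h]; simp [pvBits]
    · rw [pvToBin_bits]
      have := pvBits_nonneg p
      omega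
  apply pvBits_inj
  · intro c hc
    rcases List.mem_append.mp hc with h | h
    · left; exact List.eq_of_mem_replicate h
    · exact hbbin c h
  · exact hb
  · rw [List.length_append, List.length_replicate]; omega
  · rw [pvBits_append, pvBits_rep0, hbv]; simp

-- ===== VERDICT (by name: the statement is the Claim_ definition above) =====
theorem get_prev_binary_string_spec : Claim_equal_get_prev_binary_string := by
  intro n s _ hpre
  unfold Spec_get_prev_binary_string
  obtain ⟨hlen, hbin⟩ := hpre
  unfold get_prev_binary_string get_prev_binary_string_alt
  by_cases hn : n ≤ 0
  · rw [PySem.List.pyRange_neg_one_eq_nil (by omega), if_pos hn]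
    simp [pvALoop]
  · rw [if_neg hn]
    have hn0 : 0 ≤ n := by omega
    set m : Nat := n.toNat with hmdef
    have hm1 : 1 ≤ m := by omega
    have hml : m ≤ s.toList.length := by omega
    have hmn : n = ((m : Nat) : Int) := by omega
    rw [PySem.List.slice_to s.toList hn0, PySem.List.slice_from s.toList hn0, hmn,
      pvALoop_eq m s.toList hml]
    simp only [Int.toNat_natCast]
    rw [pvParse2_eq (s.toList.take m) (pvBin_of_all _ hbin)]
    set cs := s.toList with hcs
    set p : List Char := cs.take m with hp
    have hplen : p.length = m := by rw [hp]; simp [hml]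
    have hpbin : pvBin p := pvBin_of_all p hbin
    have hpow : (0 : Int) < 2 ^ m := by positivity
    rcases pvAux_range cs m with hr | hr
    · -- no '1' among the first m chars: p is all zeros, wraparound to all ones
      rw [hr, if_pos rfl]
      have hp0 : p = List.replicate m '0' := by
        rw [List.eq_replicate_iff]
        refine ⟨hplen, ?_⟩
        intro b hbmem
        rcases hpbin b hbmem with h | h
        · exact h
        · exfalso
          obtain ⟨i, hi, hgi⟩ := List.getElem_of_mem hbmem
          have him : i < m := by omega
          apply pvAux_spec_neg cs m hr i him
          have hip : p[i]? = some '1' := by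
            rw [List.getElem?_eq_getElem hi, hgi, h]
          rw [hp, List.getElem?_take, if_pos him] at hip
          exact hip
      have hv : pvBits p = 0 := by rw [hp0, pvBits_rep0]
      have hrval : PySem.Int.mod (pvBits p - 1) ((2 : Int) ^ m) = 2 ^ m - 1 := by
        rw [hv, PySem.Int.mod_eq_emod_of_pos hpow]
        have : (0 : Int) - 1 = (2 ^ m - 1) + 2 ^ m * (-1) := by ring
        rw [this, Int.add_mul_emod_self_left, Int.emod_eq_of_lt (by omega) (by omega)]
      have hfmt : pvFmt m ((2 : Int) ^ m - 1) = List.replicate m '1' := by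
        have h1 := pvFormat_eq (List.replicate m '1')
          (by intro c hc; right; exact List.eq_of_mem_replicate hc)
          (by simp; omega)
        rwa [pvBits_rep1, List.length_replicate] at h1
      rw [hrval, hfmt]
    · -- last '1' at index j: A's result prefix is take j ++ '0' ++ ones, value v-1
      rw [if_neg (by omega)]
      set j : Nat := (pvAux cs m).toNat with hj
      have hjm : j < m := by omega
      obtain ⟨hget1, hnone⟩ := pvAux_spec_pos cs m hr.1
      set k : Nat := m - j - 1 with hk
      have hpj? : p[j]? = some '1' := by
        rw [hp, List.getElem?_take, if_pos hjm]
        exact hget1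
      have hpj : p[j]'(by omega) = '1' := by
        rw [List.getElem?_eq_getElem (show j < p.length by omega)] at hpj?
        exact Option.some.inj hpj?
      have hdropz : p.drop (j + 1) = List.replicate k '0' := by
        rw [List.eq_replicate_iff]
        refine ⟨by rw [List.length_drop, hplen]; omega, ?_⟩
        intro b hbmem
        obtain ⟨i, hi, hgi⟩ := List.getElem_of_mem hbmem
        have hi' : i < m - (j + 1) := by
          rw [List.length_drop, hplen] at hi; omega
        have hbp : b ∈ p := List.mem_of_mem_drop hbmem
        rcases hpbin b hbp with h | h
        · exact h
        · exfalso
          apply hnone (j + 1 + i) (by omega) (by omega)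
          have hip : p[j + 1 + i]? = some '1' := by
            have hd : (p.drop (j + 1))[i]? = some '1' := by
              rw [List.getElem?_eq_getElem hi, hgi, h]
            rwa [List.getElem?_drop] at hd
          rw [hp, List.getElem?_take, if_pos (by omega)] at hip
          exact hip
      have hpdec : p = p.take j ++ '1' :: List.replicate k '0' := by
        conv_lhs => rw [← List.take_append_drop j p]
        congr 1
        rw [List.drop_eq_getElem_cons (show j < p.length by omega), hpj, hdropz]
      have htakeq : cs.take j = p.take j := by
        rw [hp, List.take_take, min_eq_left (by omega)]
      have hqbin : pvBin (p.take j) := fun c hc => hpbin c (List.mem_of_mem_take hc)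
      have hqlen : (p.take j).length = j := by simp [hplen]; omega
      have hone0 : pvBits ('1' :: List.replicate k '0') = 2 ^ k := by
        rw [pvBits_cons, pvBits_rep0]; simp
      have hzero1 : pvBits ('0' :: List.replicate k '1') = 2 ^ k - 1 := by
        rw [pvBits_cons, pvBits_rep1]; simp
      have hv : pvBits p = pvBits (p.take j) * 2 ^ (k + 1) + 2 ^ k := by
        conv_lhs => rw [hpdec]
        rw [pvBits_append, hone0]
        simp
      set t : List Char := p.take j ++ '0' :: List.replicate k '1' with ht
      have htbits : pvBits t = pvBits p - 1 := by
        rw [ht, pvBits_append, hzero1, hv]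
        simp
        ring
      have htlen : t.length = m := by
        rw [ht, List.length_append, hqlen]
        simp
        omega
      have htbin : pvBin t := by
        intro c hc
        rcases List.mem_append.mp hc with h | h
        · exact hqbin c h
        · rcases List.mem_cons.mp h with h | h
          · left; exact h
          · right; exact List.eq_of_mem_replicate h
      have hq0 := pvBits_nonneg (p.take j)
      have hk1 : (0 : Int) < 2 ^ k := by positivity
      have hk2 : (0 : Int) ≤ 2 ^ (k + 1) := by positivity
      have hvpos : 1 ≤ pvBits p := by nlinarith
      have hvlt : pvBits p < 2 ^ m := by
        have h1 := pvBits_lt p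
        rwa [hplen] at h1
      have hrval : PySem.Int.mod (pvBits p - 1) ((2 : Int) ^ m) = pvBits p - 1 := by
        rw [PySem.Int.mod_eq_emod_of_pos hpow, Int.emod_eq_of_lt (by omega) (by omega)]
      have hfmt : pvFmt m (pvBits p - 1) = t := by
        have h1 := pvFormat_eq t htbin (by omega)
        rwa [htbits, htlen] at h1
      rw [hrval, hfmt, htakeq, ht]
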